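-- pv_equiv track=rewrite | github.com/ali-john/Leetcode-solutions | my-folder/4161-minimum-bitwise-or-from-grid/solution.py | minimumOR
-- ===== SOURCE A (Python) =====
-- from typing import List
--
-- def minimumOR(grid: List[List[int]]) -> int:
--
--     ans = 0
--     rows = len(grid)
--
--     for bit in range(17, -1, -1):
--
--         temp = [[] for _ in range(rows)]
--         possible = True
--
--         for i in range(rows):
--             for num in grid[i]:
--                 if (num & (1 << bit)) == 0:
--                     temp[i].append(num)
--
--             if not temp[i]:
--                 possible = False
--                 break
--
--         if not possible:
--             ans |= (1 << bit)
--         else: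
--             grid = temp
--
--     return ans
-- ===== SOURCE B (Python) =====
-- from typing import List
--
-- def minimumOR(grid: List[List[int]]) -> int:
--     # Dynamic programming over the set of achievable OR values (within the
--     # 18-bit range the task considers), instead of greedy per-bit elimination.
--     MASK = (1 << 18) - 1
--     cands = {0}
--     for row in grid:
--         cands = {c | (num & MASK) for c in cands for num in row}
--     return min(cands)
-- ===== Notes on version B (the rewrite author's own statement) =====
-- stated objective: alternative
-- what changed: Replaces the greedy high-to-low per-bit feasibility loop (with per-row candidate filtering) by a forward dynamic program that builds the set of all achievable 18-bit OR values row by row and returns its minimum.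
-- outside the precondition, e.g. on minimumOR([[]]): A returns 262143, B raises ValueError
import Mathlib
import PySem

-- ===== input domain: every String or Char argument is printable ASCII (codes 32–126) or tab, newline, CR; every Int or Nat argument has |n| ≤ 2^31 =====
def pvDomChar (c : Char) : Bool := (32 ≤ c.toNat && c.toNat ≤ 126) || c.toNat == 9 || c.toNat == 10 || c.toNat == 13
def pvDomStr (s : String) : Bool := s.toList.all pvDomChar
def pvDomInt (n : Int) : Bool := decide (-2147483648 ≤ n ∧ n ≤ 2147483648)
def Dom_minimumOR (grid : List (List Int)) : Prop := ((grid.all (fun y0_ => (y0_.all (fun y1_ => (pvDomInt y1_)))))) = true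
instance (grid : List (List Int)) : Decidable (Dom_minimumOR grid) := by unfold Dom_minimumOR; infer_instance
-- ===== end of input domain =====

-- B replaces A's greedy high-to-low per-bit elimination by a forward dynamic program
-- over the set of achievable 18-bit OR values; same return value on Pre_ (rows nonempty).

-- ===== PORT A =====
-- inner row loop of A for one bit: filter each current row, fail (break) on an empty row
def pvBuildTemp (bit : Nat) : List (List Int) → Option (List (List Int))
  | [] => some []
  | row :: rest =>
    let t := row.filter (fun num => PySem.Int.band num ((1 <<< bit : Nat) : Int) == 0)
    if t.isEmpty then none
    else (pvBuildTemp bit rest).map (fun ts => t :: ts)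

def pvStepA (st : Int × List (List Int)) (bit : Nat) : Int × List (List Int) :=
  match pvBuildTemp bit st.2 with
  | none => (PySem.Int.bor st.1 ((1 <<< bit : Nat) : Int), st.2)
  | some t => (st.1, t)

def minimumOR (grid : List (List Int)) : Int :=
  ((List.range 18).reverse.foldl pvStepA (0, grid)).1

-- ===== PORT B =====
-- cands = {c | (num & MASK) for c in cands for num in row}, with MASK = (1 << 18) - 1
def pvDPStep (cands : PySem.Set Int) (row : List Int) : PySem.Set Int :=
  PySem.Set.ofList (cands.flatMap (fun c =>
    row.map (fun num => PySem.Int.bor c (PySem.Int.band num ((1 <<< 18 : Int) - 1)))))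

def minimumOR_alt (grid : List (List Int)) : Int :=
  match PySem.List.min? (grid.foldl pvDPStep (PySem.Set.ofList [0])) (fun x => x) with
  | some v => v
  | none => 0   -- unreachable under Pre_: Python's min([]) raises ValueError

-- ===== PRECONDITION & SPEC =====
-- Pre_ excludes grids containing an empty row: there A returns 262143 (every bit forced,
-- an artefact of the break) while B's candidate set is empty and min() raises ValueError.
def Pre_minimumOR (grid : List (List Int)) : Prop := (grid.all (fun row => !row.isEmpty)) = true
instance (grid : List (List Int)) : Decidable (Pre_minimumOR grid) := by unfold Pre_minimumOR; infer_instance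
def pvWitness_minimumOR : List (List Int) := [[1, 2], [3]]

def Spec_minimumOR (grid : List (List Int)) (out : Int) : Prop := out = minimumOR_alt grid
instance (grid : List (List Int)) (out : Int) : Decidable (Spec_minimumOR grid out) := by unfold Spec_minimumOR; infer_instance

-- ===== CLAIM (what is proved, stated in full; the proofs are below) =====
def Claim_equal_minimumOR : Prop := ∀ (grid : List (List Int)), Dom_minimumOR grid → Pre_minimumOR grid → Spec_minimumOR grid (minimumOR grid)

-- ===== LEMMAS AND PROOFS =====

-- ---------- generic Nat bit lemmas ----------
theorem natEqIffTestBit (a b : Nat) : a = b ↔ ∀ i, a.testBit i = b.testBit i :=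
  ⟨fun h i => by rw [h], Nat.eq_of_testBit_eq⟩

theorem nat_and_or_zero (x f b : Nat) : x &&& (f ||| b) = 0 ↔ x &&& f = 0 ∧ x &&& b = 0 := by
  simp only [natEqIffTestBit, Nat.testBit_and, Nat.testBit_or, Nat.zero_testBit]
  constructor
  · intro h
    constructor <;> intro i <;> have := h i <;>
      cases hf : Nat.testBit f i <;> cases hb : Nat.testBit b i <;> simp_all
  · rintro ⟨h1, h2⟩ i; have := h1 i; have := h2 i
    cases hf : Nat.testBit f i <;> cases hb : Nat.testBit b i <;> simp_all

theorem nat_or_submask (y f b : Nat) : (f ||| b) &&& y = f ||| b ↔ f &&& y = f ∧ b &&& y = b := by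
  simp only [natEqIffTestBit, Nat.testBit_and, Nat.testBit_or]
  constructor
  · intro h
    constructor <;> intro i <;> have := h i <;>
      cases hf : Nat.testBit f i <;> cases hb : Nat.testBit b i <;> simp_all
  · rintro ⟨h1, h2⟩ i; have := h1 i; have := h2 i
    cases hf : Nat.testBit f i <;> cases hb : Nat.testBit b i <;> simp_all

theorem nat_or_and_zero (a b m : Nat) : (a ||| b) &&& m = 0 ↔ a &&& m = 0 ∧ b &&& m = 0 := by
  rw [Nat.land_comm, nat_and_or_zero, Nat.land_comm m a, Nat.land_comm m b]

theorem disj_add (a : Nat) : ∀ b, a &&& b = 0 → a ||| b = a + b := by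
  induction a using Nat.binaryRec with
  | zero => simp
  | bit abit n ih =>
    intro b h
    induction b using Nat.binaryRec with
    | zero => simp
    | bit bbit m _ =>
      rw [Nat.land_bit] at h
      rw [Nat.lor_bit]
      have h1 : (abit && bbit) = false ∧ n &&& m = 0 := by
        rcases Nat.bit_eq_zero_iff.mp h with ⟨h1, h2⟩; exact ⟨h2, h1⟩
      rw [ih m h1.2, Nat.bit_val, Nat.bit_val, Nat.bit_val]
      cases abit <;> cases bbit <;> simp_all <;> omega

theorem sub_and (m c : Nat) : m - (m &&& c) = (m ^^^ c) &&& m := by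
  have hd : (m &&& c) &&& ((m ^^^ c) &&& m) = 0 := by
    simp only [natEqIffTestBit, Nat.testBit_and, Nat.testBit_xor, Nat.zero_testBit]
    intro i; cases hm : m.testBit i <;> cases hc : c.testBit i <;> simp
  have ho : (m &&& c) ||| ((m ^^^ c) &&& m) = m := by
    simp only [natEqIffTestBit, Nat.testBit_and, Nat.testBit_or, Nat.testBit_xor]
    intro i; cases hm : m.testBit i <;> cases hc : c.testBit i <;> simp
  have := disj_add _ _ hd
  omega

theorem subset_and (t M m : Nat) (h : m &&& M = m) : (t &&& M) &&& m = t &&& m := by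
  have hb : ∀ i, (m.testBit i && M.testBit i) = m.testBit i := by
    intro i; rw [← Nat.testBit_and, h]
  simp only [natEqIffTestBit, Nat.testBit_and]
  intro i; have := hb i
  cases hm : m.testBit i <;> cases hM : M.testBit i <;> cases ht : t.testBit i <;> simp_all

theorem subset_xor_and (c M m : Nat) (h : m &&& M = m) :
    ((M ^^^ c) &&& M) &&& m = (m ^^^ c) &&& m := by
  have hb : ∀ i, (m.testBit i && M.testBit i) = m.testBit i := by
    intro i; rw [← Nat.testBit_and, h]
  simp only [natEqIffTestBit, Nat.testBit_and, Nat.testBit_xor]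
  intro i; have := hb i
  cases hm : m.testBit i <;> cases hM : M.testBit i <;> cases hc : c.testBit i <;> simp_all

theorem good_or (a b M : Nat) (ha : a &&& M = a) (hb : b &&& M = b) :
    (a ||| b) &&& M = a ||| b := (nat_or_submask M a b).mpr ⟨ha, hb⟩

theorem two_pow_and_of_lt (x n : Nat) (h : x < 2 ^ n) : 2 ^ n &&& x = 0 := by
  simp only [natEqIffTestBit, Nat.testBit_and, Nat.zero_testBit, Nat.testBit_two_pow]
  intro i
  by_cases hi : n = i
  · subst hi; rw [Nat.testBit_lt_two_pow h]; simp
  · simp [hi]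

theorem and_two_pow_zero_iff (t n : Nat) : t &&& 2 ^ n = 0 ↔ t.testBit n = false := by
  simp only [natEqIffTestBit, Nat.testBit_and, Nat.zero_testBit, Nat.testBit_two_pow]
  constructor
  · intro h; have := h n; simpa using this
  · intro h i
    by_cases hi : n = i
    · subst hi; simp [h]
    · simp [hi]

theorem mod_pow_succ_split (t n : Nat) :
    t % 2 ^ (n + 1) = t % 2 ^ n + 2 ^ n * (if t.testBit n then 1 else 0) := by
  have h : t % (2 ^ n * 2) = t % 2 ^ n + 2 ^ n * (t / 2 ^ n % 2) := Nat.mod_mul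
  rw [pow_succ]
  rw [h, Nat.testBit_eq_decide_div_mod_eq]
  have : t / 2 ^ n % 2 = 0 ∨ t / 2 ^ n % 2 = 1 := by omega
  rcases this with h0 | h1
  · simp [h0]
  · simp [h1]

theorem mod_succ_bit_false {t n : Nat} (h : t.testBit n = false) :
    t % 2 ^ (n + 1) = t % 2 ^ n := by rw [mod_pow_succ_split, h]; simp

theorem mod_succ_bit_true {t n : Nat} (h : t.testBit n = true) :
    t % 2 ^ (n + 1) = t % 2 ^ n + 2 ^ n := by rw [mod_pow_succ_split, h]; simp

-- ---------- A-side: A's fold equals a mask-based greedy over the original grid ----------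
-- testing an int against the union of two nonnegative masks = testing against each
theorem band_mask_split (n : Int) (f b : Nat) :
    PySem.Int.band n ((f ||| b : Nat) : Int) = 0 ↔
      PySem.Int.band n (f : Int) = 0 ∧ PySem.Int.band n (b : Int) = 0 := by
  by_cases hn : 0 ≤ n
  · rw [PySem.Int.band_of_nonneg hn (by positivity), PySem.Int.band_of_nonneg hn (by positivity),
      PySem.Int.band_of_nonneg hn (by positivity)]
    simp only [Int.toNat_natCast, Nat.cast_eq_zero]
    exact nat_and_or_zero n.toNat f b
  · simp only [PySem.Int.band, hn, if_false, Int.natCast_nonneg, if_true, Int.toNat_natCast,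
      Nat.cast_eq_zero]
    have h1 : (f ||| b) &&& (-n - 1).toNat ≤ f ||| b := Nat.and_le_left
    have h2 : f &&& (-n - 1).toNat ≤ f := Nat.and_le_left
    have h3 : b &&& (-n - 1).toNat ≤ b := Nat.and_le_left
    have := nat_or_submask ((-n - 1).toNat) f b
    omega

def pvRowFilter (F : Nat) (row : List Int) : List Int :=
  row.filter (fun num => PySem.Int.band num (F : Int) == 0)

theorem rowFilter_zero (row : List Int) : pvRowFilter 0 row = row := by
  simp [pvRowFilter, PySem.Int.band_zero]

theorem rowFilter_comp (F B : Nat) (row : List Int) :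
    (pvRowFilter F row).filter (fun num => PySem.Int.band num (B : Int) == 0)
      = pvRowFilter (F ||| B) row := by
  simp only [pvRowFilter, List.filter_filter]
  apply List.filter_congr
  intro n _
  rw [Bool.eq_iff_iff]
  simp only [Bool.and_eq_true, beq_iff_eq, band_mask_split]
  tauto

theorem buildTemp_eq (B F : Nat) (grid : List (List Int)) :
    pvBuildTemp B (grid.map (pvRowFilter F))
      = if grid.all (fun row => row.any (fun num => PySem.Int.band num ((F ||| (1 <<< B : Nat) : Nat) : Int) == 0)) then
          some (grid.map (pvRowFilter (F ||| (1 <<< B : Nat))))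
        else none := by
  induction grid with
  | nil => simp [pvBuildTemp]
  | cons row rest ih =>
    simp only [List.map_cons, pvBuildTemp, rowFilter_comp]
    by_cases hrow : (pvRowFilter (F ||| (1 <<< B : Nat)) row).isEmpty = true
    · have : row.any (fun num => PySem.Int.band num ((F ||| (1 <<< B : Nat) : Nat) : Int) == 0) = false := by
        rw [List.isEmpty_iff, pvRowFilter, List.filter_eq_nil_iff] at hrow
        simp only [List.any_eq_false]
        intro n hn
        simpa using hrow n hn
      simp [hrow, this]
    · have : row.any (fun num => PySem.Int.band num ((F ||| (1 <<< B : Nat) : Nat) : Int) == 0) = true := by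
        rw [List.isEmpty_iff] at hrow
        rcases List.exists_mem_of_ne_nil _ hrow with ⟨n, hn⟩
        simp only [pvRowFilter, List.mem_filter] at hn
        exact List.any_eq_true.mpr ⟨n, hn.1, hn.2⟩
      rw [if_neg hrow, ih]
      by_cases hall : rest.all (fun row => row.any (fun num => PySem.Int.band num ((F ||| (1 <<< B : Nat) : Nat) : Int) == 0)) = true <;>
        simp [hall, this]

-- the mask-based greedy step (proof-side abstraction of A's loop body)
def pvMaskStep (grid : List (List Int)) (st : Int × Int) (bit : Nat) : Int × Int :=
  let mask := PySem.Int.bor st.2 ((1 <<< bit : Nat) : Int)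
  if grid.all (fun row => row.any (fun num => PySem.Int.band num mask == 0)) then
    (st.1, mask)
  else
    (PySem.Int.bor st.1 ((1 <<< bit : Nat) : Int), st.2)

theorem fold_invariant (grid : List (List Int)) (bits : List Nat) (ans : Int) (F : Nat) :
    (bits.foldl pvStepA (ans, grid.map (pvRowFilter F))).1
      = (bits.foldl (pvMaskStep grid) (ans, (F : Int))).1 := by
  induction bits generalizing ans F with
  | nil => rfl
  | cons b rest ih =>
    simp only [List.foldl_cons, pvStepA, pvMaskStep, buildTemp_eq b F grid]
    by_cases hall : grid.all (fun row => row.any (fun num => PySem.Int.band num ((F ||| (1 <<< b : Nat) : Nat) : Int) == 0)) = true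
    · have hmask : PySem.Int.bor (F : Int) ((1 <<< b : Nat) : Int) = ((F ||| (1 <<< b : Nat) : Nat) : Int) :=
        PySem.Int.bor_natCast F (1 <<< b)
      rw [if_pos hall]
      simp only [hmask, hall, if_pos]
      exact ih ans (F ||| (1 <<< b : Nat))
    · have hmask : PySem.Int.bor (F : Int) ((1 <<< b : Nat) : Int) = ((F ||| (1 <<< b : Nat) : Nat) : Int) :=
        PySem.Int.bor_natCast F (1 <<< b)
      rw [if_neg hall]
      simp only [hmask, hall, if_neg, Bool.false_eq_true, not_false_iff]
      exact ih _ F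

-- ---------- values: Python's  x & MASK  as a Nat ----------
def pvM : Nat := 262143   -- (1 << 18) - 1

def pvBandN (x : Int) (m : Nat) : Nat :=
  (if 0 ≤ x then x.toNat else m ^^^ (-x - 1).toNat) &&& m

theorem band_eq_bandN (x : Int) (m : Nat) : PySem.Int.band x (m : Int) = (pvBandN x m : Int) := by
  unfold pvBandN
  by_cases hx : 0 ≤ x
  · rw [PySem.Int.band_of_nonneg hx (by positivity)]
    simp [hx]
  · simp only [PySem.Int.band, hx, if_false, Int.natCast_nonneg, if_true, Int.toNat_natCast]
    rw [sub_and]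

theorem bandN_good (x : Int) (m : Nat) : pvBandN x m &&& m = pvBandN x m := by
  unfold pvBandN
  rw [Nat.land_assoc, Nat.and_self]

theorem bandN_mask (x : Int) (m : Nat) (h : m &&& pvM = m) :
    pvBandN x pvM &&& m = pvBandN x m := by
  unfold pvBandN
  by_cases hx : 0 ≤ x
  · simp only [hx, if_true]
    exact subset_and _ _ _ h
  · simp only [hx, if_false]
    exact subset_xor_and _ _ _ h

-- ---------- the achievable OR values ----------
def pvNStep (cs : List Nat) (row : List Int) : List Nat :=
  cs.flatMap (fun c => row.map (fun x => c ||| pvBandN x pvM))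

def pvNOrs (cs : List Nat) (g : List (List Int)) : List Nat := g.foldl pvNStep cs

theorem nors_ne_nil (g : List (List Int)) (hg : (g.all (fun row => !row.isEmpty)) = true) :
    ∀ cs : List Nat, cs ≠ [] → pvNOrs cs g ≠ [] := by
  induction g with
  | nil => intro cs h; exact h
  | cons row rest ih =>
    intro cs h
    simp only [List.all_cons, Bool.and_eq_true] at hg
    refine ih hg.2 _ ?_
    rcases List.exists_mem_of_ne_nil _ h with ⟨c, hc⟩
    have hrow : row ≠ [] := by
      cases row <;> simp_all
    rcases List.exists_mem_of_ne_nil _ hrow with ⟨x, hx⟩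
    intro hnil
    have : c ||| pvBandN x pvM ∈ pvNStep cs row := by
      simp only [pvNStep, List.mem_flatMap, List.mem_map]
      exact ⟨c, hc, x, hx, rfl⟩
    rw [hnil] at this
    exact absurd this (List.not_mem_nil)

theorem nors_good (g : List (List Int)) :
    ∀ cs : List Nat, (∀ c ∈ cs, c &&& pvM = c) →
      ∀ s ∈ pvNOrs cs g, s &&& pvM = s := by
  induction g with
  | nil => intro cs h s hs; exact h s hs
  | cons row rest ih =>
    intro cs h s hs
    refine ih _ ?_ s hs
    intro c hc
    simp only [pvNStep, List.mem_flatMap, List.mem_map] at hc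
    rcases hc with ⟨c0, hc0, x, _, rfl⟩
    exact good_or _ _ _ (h c0 hc0) (bandN_good x pvM)

-- feasibility of a mask on the grid = existence of an achievable value avoiding it
theorem ex_lemma (m : Nat) (hm : m &&& pvM = m) (g : List (List Int)) :
    ∀ cs : List Nat,
      ((g.all (fun row => row.any (fun x => PySem.Int.band x (m : Int) == 0))) &&
        cs.any (fun c => c &&& m == 0))
      = (pvNOrs cs g).any (fun s => s &&& m == 0) := by
  induction g with
  | nil => intro cs; simp [pvNOrs]
  | cons row rest ih =>
    intro cs
    have step : (pvNStep cs row).any (fun s => s &&& m == 0)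
        = (cs.any (fun c => c &&& m == 0) && row.any (fun x => PySem.Int.band x (m : Int) == 0)) := by
      rw [Bool.eq_iff_iff]
      simp only [List.any_eq_true, Bool.and_eq_true, pvNStep, List.mem_flatMap, List.mem_map,
        beq_iff_eq]
      constructor
      · rintro ⟨s, ⟨c, hc, x, hx, rfl⟩, hz⟩
        rcases (nat_or_and_zero _ _ _).mp hz with ⟨hcz, hxz⟩
        refine ⟨⟨c, hc, hcz⟩, ⟨x, hx, ?_⟩⟩
        rw [band_eq_bandN]
        rw [bandN_mask x m hm] at hxz
        exact_mod_cast congrArg (Nat.cast : Nat → Int) hxz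
      · rintro ⟨⟨c, hc, hcz⟩, ⟨x, hx, hxz⟩⟩
        refine ⟨c ||| pvBandN x pvM, ⟨c, hc, x, hx, rfl⟩, ?_⟩
        rw [band_eq_bandN] at hxz
        have : pvBandN x m = 0 := by exact_mod_cast hxz
        rw [← bandN_mask x m hm] at this
        exact (nat_or_and_zero _ _ _).mpr ⟨hcz, this⟩
    calc ((row :: rest).all _ && cs.any (fun c => c &&& m == 0))
        = (rest.all (fun row => row.any (fun x => PySem.Int.band x (m : Int) == 0)) &&
            (pvNStep cs row).any (fun s => s &&& m == 0)) := by
          simp only [List.all_cons, step]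
          cases row.any (fun x => PySem.Int.band x (m : Int) == 0) <;>
            cases rest.all (fun row => row.any (fun x => PySem.Int.band x (m : Int) == 0)) <;>
            cases cs.any (fun c => c &&& m == 0) <;> rfl
      _ = (pvNOrs (pvNStep cs row) rest).any (fun s => s &&& m == 0) := ih _
      _ = (pvNOrs cs (row :: rest)).any (fun s => s &&& m == 0) := rfl

-- ---------- the Nat-level greedy and its optimality ----------
def pvGStep (S : List Nat) (st : Nat × Nat) (b : Nat) : Nat × Nat :=
  if S.any (fun s => s &&& (st.2 ||| (1 <<< b)) == 0) then (st.1, st.2 ||| (1 <<< b))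
  else (st.1 ||| (1 <<< b), st.2)

theorem greedy_min (S : List Nat) :
    ∀ (n ans F : Nat), (∃ t ∈ S, t &&& F = 0) →
      ∃ s ∈ S, s &&& F = 0 ∧
        (((List.range n).reverse.foldl (pvGStep S) (ans, F)).1 = ans ||| (s % 2 ^ n)) ∧
        (∀ t ∈ S, t &&& F = 0 → s % 2 ^ n ≤ t % 2 ^ n) := by
  intro n
  induction n with
  | zero =>
    rintro ans F ⟨t, ht, htF⟩
    exact ⟨t, ht, htF, by simp [Nat.mod_one], fun t' _ _ => by simp [Nat.mod_one]⟩
  | succ n ih =>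
    intro ans F hne
    have hshift : (1 <<< n : Nat) = 2 ^ n := by rw [Nat.shiftLeft_eq, one_mul]
    have hbits : (List.range (n + 1)).reverse = n :: (List.range n).reverse := by
      rw [List.range_succ, List.reverse_append]; rfl
    have hpos : 0 < 2 ^ n := Nat.two_pow_pos n
    rw [hbits, List.foldl_cons]
    by_cases hany : S.any (fun s => s &&& (F ||| (1 <<< n)) == 0) = true
    · -- bit n can be cleared
      have hstep : pvGStep S (ans, F) n = (ans, F ||| (1 <<< n)) := by
        simp only [pvGStep, hany, if_pos]
      rw [hstep]
      have hne' : ∃ t ∈ S, t &&& (F ||| (1 <<< n)) = 0 := by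
        rcases List.any_eq_true.mp hany with ⟨t, ht, htz⟩
        exact ⟨t, ht, by simpa using htz⟩
      rcases ih ans (F ||| (1 <<< n)) hne' with ⟨s, hs, hsF', hval, hmin⟩
      rw [hshift] at hsF'
      rcases (nat_and_or_zero _ _ _).mp hsF' with ⟨hsF, hsbit⟩
      have hsb : s.testBit n = false := (and_two_pow_zero_iff _ _).mp hsbit
      refine ⟨s, hs, hsF, ?_, ?_⟩
      · rw [hval, mod_succ_bit_false hsb]
      · intro t ht htF
        rw [mod_succ_bit_false hsb]
        cases hb : t.testBit n with
        | false =>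
          rw [mod_succ_bit_false hb]
          exact hmin t ht ((nat_and_or_zero _ _ _).mpr
            ⟨htF, by rw [hshift]; exact (and_two_pow_zero_iff _ _).mpr hb⟩)
        | true =>
          rw [mod_succ_bit_true hb]
          have := Nat.mod_lt s hpos
          omega
    · -- bit n is forced
      have hstep : pvGStep S (ans, F) n = (ans ||| (1 <<< n), F) := by
        simp only [pvGStep, hany]; rfl
      rw [hstep]
      rcases ih (ans ||| (1 <<< n)) F hne with ⟨s, hs, hsF, hval, hmin⟩
      have hforced : ∀ t ∈ S, t &&& F = 0 → t.testBit n = true := by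
        intro t ht htF
        by_contra hbit
        have hbit' : t.testBit n = false := by cases h : t.testBit n <;> simp_all
        have hz : t &&& (F ||| (1 <<< n)) = 0 := (nat_and_or_zero _ _ _).mpr
          ⟨htF, by rw [hshift]; exact (and_two_pow_zero_iff _ _).mpr hbit'⟩
        have : S.any (fun s => s &&& (F ||| (1 <<< n)) == 0) = true :=
          List.any_eq_true.mpr ⟨t, ht, by simpa using hz⟩
        exact hany this
      have hsb : s.testBit n = true := hforced s hs hsF
      refine ⟨s, hs, hsF, ?_, ?_⟩
      · rw [hval, mod_succ_bit_true hsb, hshift]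
        have hlt : s % 2 ^ n < 2 ^ n := Nat.mod_lt s hpos
        rw [show s % 2 ^ n + 2 ^ n = 2 ^ n ||| s % 2 ^ n by
          rw [disj_add _ _ (two_pow_and_of_lt _ _ hlt)]; omega]
        rw [Nat.lor_assoc]
      · intro t ht htF
        rw [mod_succ_bit_true hsb, mod_succ_bit_true (hforced t ht htF)]
        have := hmin t ht htF
        omega

theorem shift_good (b : Nat) (hb : b < 18) : (1 <<< b) &&& pvM = 1 <<< b := by
  rw [Nat.shiftLeft_eq, one_mul]
  have hM : pvM = 2 ^ 18 - 1 := rfl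
  simp only [natEqIffTestBit, Nat.testBit_and, hM, Nat.testBit_two_pow_sub_one, Nat.testBit_two_pow]
  intro i
  by_cases hi : b = i
  · subst hi; simp [hb]
  · simp [hi]

-- ---------- bridging the Int mask fold to the Nat greedy ----------
theorem mask_fold_eq_gstep (grid : List (List Int)) :
    ∀ (bits : List Nat), (∀ b ∈ bits, b < 18) →
      ∀ (a F : Nat), F &&& pvM = F →
        (bits.foldl (pvMaskStep grid) ((a : Int), (F : Int))).1
          = (((bits.foldl (pvGStep (pvNOrs [0] grid)) (a, F)).1 : Nat) : Int) := by
  intro bits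
  induction bits with
  | nil => intro _ a F _; rfl
  | cons b rest ih =>
    intro hb a F hF
    have hb18 : b < 18 := hb b (by simp)
    have hrest : ∀ b' ∈ rest, b' < 18 := fun b' h => hb b' (by simp [h])
    have hm : (F ||| 1 <<< b) &&& pvM = F ||| 1 <<< b := good_or _ _ _ hF (shift_good b hb18)
    have hex := ex_lemma (F ||| 1 <<< b) hm grid [0]
    have h0 : ([0] : List Nat).any (fun c => c &&& (F ||| 1 <<< b) == 0) = true := by
      simp [Nat.zero_and]
    rw [h0, Bool.and_true] at hex
    simp only [List.foldl_cons, pvMaskStep, pvGStep, PySem.Int.bor_natCast]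
    by_cases hc : grid.all (fun row => row.any (fun num => PySem.Int.band num ((F ||| 1 <<< b : Nat) : Int) == 0)) = true
    · rw [if_pos hc, if_pos (hex ▸ hc)]
      exact ih hrest a (F ||| 1 <<< b) hm
    · rw [if_neg hc, if_neg (fun h => hc (hex ▸ h))]
      exact ih hrest (a ||| 1 <<< b) F hF

-- ---------- B-side characterisation ----------
theorem mask_lit : ((1 <<< 18 : Int) - 1) = ((pvM : Nat) : Int) := by decide

theorem dp_mem (grid : List (List Int)) :
    ∀ (s : PySem.Set Int) (cs : List Nat), (∀ x : Int, x ∈ s ↔ x ∈ (cs.map (Nat.cast : Nat → Int))) →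
      ∀ x : Int, x ∈ grid.foldl pvDPStep s ↔ x ∈ ((pvNOrs cs grid).map (Nat.cast : Nat → Int)) := by
  induction grid with
  | nil => intro s cs h x; exact h x
  | cons row rest ih =>
    intro s cs h x
    refine ih _ _ ?_ x
    intro y
    simp only [pvDPStep, PySem.Set.mem_ofList, List.mem_flatMap, List.mem_map, pvNStep]
    constructor
    · rintro ⟨c, hc, num, hnum, rfl⟩
      rcases List.mem_map.mp ((h c).mp hc) with ⟨cN, hcN, rfl⟩
      refine ⟨cN ||| pvBandN num pvM, ⟨cN, hcN, num, hnum, rfl⟩, ?_⟩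
      rw [mask_lit, band_eq_bandN, PySem.Int.bor_natCast]
    · rintro ⟨v, ⟨cN, hcN, num, hnum, rfl⟩, rfl⟩
      refine ⟨(cN : Int), (h _).mpr (List.mem_map.mpr ⟨cN, hcN, rfl⟩), num, hnum, ?_⟩
      rw [mask_lit, band_eq_bandN, PySem.Int.bor_natCast]

-- ===== VERDICT (by name: the statement is the Claim_ definition above) =====
theorem minimumOR_spec : Claim_equal_minimumOR := by
  intro grid _ hpre
  unfold Spec_minimumOR minimumOR minimumOR_alt Pre_minimumOR at *
  -- A side: filtering fold = mask greedy = Nat greedy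
  have h0 : grid.map (pvRowFilter 0) = grid := by
    rw [show pvRowFilter 0 = fun row => row from funext rowFilter_zero, List.map_id']
  have hA1 := fold_invariant grid (List.range 18).reverse 0 0
  rw [h0] at hA1
  have hA2 := mask_fold_eq_gstep grid (List.range 18).reverse
    (by intro b hb; simp only [List.mem_reverse, List.mem_range] at hb; exact hb) 0 0 (Nat.zero_and _)
  -- the achievable set is nonempty
  have hSne : pvNOrs [0] grid ≠ [] := nors_ne_nil grid hpre [0] (by simp)
  rcases List.exists_mem_of_ne_nil _ hSne with ⟨t0, ht0⟩
  rcases greedy_min (pvNOrs [0] grid) 18 0 0 ⟨t0, ht0, Nat.and_zero _⟩ with ⟨sm, hsm, _, hval, hmin⟩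
  have hgood : sm &&& pvM = sm := nors_good grid [0] (by intro c hc; simp at hc; simp [hc, Nat.zero_and]) sm hsm
  have hlt : sm < 2 ^ 18 := by
    have : sm &&& pvM ≤ pvM := Nat.and_le_right
    rw [hgood] at this
    have : pvM < 2 ^ 18 := by decide
    omega
  have hval' : (((List.range 18).reverse.foldl (pvGStep (pvNOrs [0] grid)) (0, 0)).1) = sm := by
    rw [hval, Nat.mod_eq_of_lt hlt, Nat.zero_or]
  simp only [Nat.cast_zero] at hA1 hA2
  have hAv : ((List.range 18).reverse.foldl pvStepA (0, grid)).1 = ((sm : Nat) : Int) := by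
    rw [hA1, hA2, hval']
  -- B side
  have hmem := dp_mem grid (PySem.Set.ofList [0]) [0]
    (by intro x; rw [PySem.Set.mem_ofList]; simp)
  have hsmem : ((sm : Nat) : Int) ∈ grid.foldl pvDPStep (PySem.Set.ofList [0]) :=
    (hmem _).mpr (List.mem_map.mpr ⟨sm, hsm, rfl⟩)
  have hLne : grid.foldl pvDPStep (PySem.Set.ofList [0]) ≠ [] := by
    intro h; rw [h] at hsmem; exact absurd hsmem (List.not_mem_nil)
  rcases hv : PySem.List.min? (grid.foldl pvDPStep (PySem.Set.ofList [0])) (fun x => x) with _ | v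
  · exact absurd ((PySem.List.min?_eq_none_iff _ _).mp hv) hLne
  · rcases List.mem_map.mp ((hmem v).mp (PySem.List.min?_mem hv)) with ⟨w, hw, rfl⟩
    have h1 : ((w : Nat) : Int) ≤ ((sm : Nat) : Int) := PySem.List.min?_isMin hv _ hsmem
    have hwlt : w < 2 ^ 18 := by
      have hg : w &&& pvM = w := nors_good grid [0] (by intro c hc; simp at hc; simp [hc, Nat.zero_and]) w hw
      have : w &&& pvM ≤ pvM := Nat.and_le_right
      rw [hg] at this
      have : pvM < 2 ^ 18 := by decide
      omega
    have h2 : sm ≤ w := by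
      have := hmin w hw (Nat.and_zero _)
      rwa [Nat.mod_eq_of_lt hlt, Nat.mod_eq_of_lt hwlt] at this
    have : w = sm := by omega
    rw [hAv, this]
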